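-- pv_equiv track=rewrite | github.com/luna0607/PatternRecognition | KNN.py | training_data
-- ===== SOURCE A (Python) =====
-- def training_data(data_para):
--     numData = []
--     testData = []
--     counter = 0
--     for row in data_para:
--         # add training data
--         if counter < 80:
--             numData.append(row[0].split(' ', 9))
--         # add testing data
--         if 80 <= counter < 100:
--             testData.append(row[0].split(' ', 9))
--         counter += 1
--         # when counter equals 100, it means a new person is coming, so clear counter,
--         if counter == 100:
--             counter = 0
--     return [numData, testData]
-- ===== SOURCE B (Python) =====
-- def training_data(data_para):
--     numData = []
--     testData = []
--     for start in range(0, len(data_para), 100):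
--         chunk = data_para[start:start + 100]
--         for row in chunk[:80]:
--             numData.append(row[0].split(' ', 9))
--         for row in chunk[80:]:
--             testData.append(row[0].split(' ', 9))
--     return [numData, testData]
-- ===== Notes on version B (the rewrite author's own statement) =====
-- stated objective: alternative
-- what changed: Replaced the per-row counter/reset state machine with a stateless pass over 100-row blocks taken by slicing, splitting each block into its first 80 (training) and remaining rows (testing).
import Mathlib
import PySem

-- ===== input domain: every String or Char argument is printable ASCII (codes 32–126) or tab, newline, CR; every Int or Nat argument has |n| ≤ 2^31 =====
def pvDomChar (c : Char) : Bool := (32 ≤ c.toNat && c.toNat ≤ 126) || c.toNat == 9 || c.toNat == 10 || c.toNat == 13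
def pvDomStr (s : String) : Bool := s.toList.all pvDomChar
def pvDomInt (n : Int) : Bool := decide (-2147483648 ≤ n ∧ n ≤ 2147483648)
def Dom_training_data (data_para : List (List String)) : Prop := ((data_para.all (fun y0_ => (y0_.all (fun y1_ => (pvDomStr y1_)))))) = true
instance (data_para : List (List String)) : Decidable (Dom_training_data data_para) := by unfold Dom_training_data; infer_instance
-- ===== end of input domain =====

-- B replaces A's per-row counter/reset loop with a stateless pass over 100-row slices,
-- each split 80/20 (objective: alternative decomposition; same return value on Pre_).

-- ===== PORT A =====
-- row[0].split(' ', 9); Pre_ guarantees row ≠ [] and the separator is nonempty, so the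
-- getD defaults never fire on admitted inputs
def rowSplit (row : List String) : List String :=
  (PySem.Str.splitMax? ((PySem.List.pyGet? row 0).getD "") " " 9).getD []

def trainStep (st : List (List String) × List (List String) × Int) (row : List String) :
    List (List String) × List (List String) × Int :=
  let numData := if st.2.2 < 80 then st.1 ++ [rowSplit row] else st.1
  let testData := if 80 ≤ st.2.2 ∧ st.2.2 < 100 then st.2.1 ++ [rowSplit row] else st.2.1
  let counter := st.2.2 + 1
  let counter := if counter = 100 then 0 else counter
  (numData, testData, counter)

def training_data (data_para : List (List String)) : List (List (List String)) :=
  let st := data_para.foldl trainStep ([], [], 0)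
  [st.1, st.2.1]

-- ===== PORT B =====
-- chunk = data[start:start+100]; chunk[:80] to training, chunk[80:] to testing;
-- the range(0, len, 100) loop becomes recursion on the remaining suffix
def altGo (data : List (List String)) : List (List String) × List (List String) :=
  match data with
  | [] => ([], [])
  | x :: xs =>
    let chunk := (x :: xs).take 100
    let rest := altGo (xs.drop 99)
    ((chunk.take 80).map rowSplit ++ rest.1, (chunk.drop 80).map rowSplit ++ rest.2)
termination_by data.length
decreasing_by simp

def training_data_alt (data_para : List (List String)) : List (List (List String)) :=
  let p := altGo data_para
  [p.1, p.2]

-- ===== PRECONDITION & SPEC =====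
-- Pre_ excludes inputs containing an empty row, on which both A and B raise IndexError at row[0]
def Pre_training_data (data_para : List (List String)) : Prop :=
  ∀ row ∈ data_para, row ≠ []

instance (data_para : List (List String)) : Decidable (Pre_training_data data_para) := by
  unfold Pre_training_data; infer_instance

def pvWitness_training_data : List (List String) := [["a b c", "z"], ["d  e"]]

def Spec_training_data (data_para : List (List String)) (out : List (List (List String))) : Prop := out = training_data_alt data_para
instance (data_para : List (List String)) (out : List (List (List String))) : Decidable (Spec_training_data data_para out) := by unfold Spec_training_data; infer_instance

-- ===== CLAIM (what is proved, stated in full; the proofs are below) =====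
def Claim_equal_training_data : Prop := ∀ (data_para : List (List String)), Dom_training_data data_para → Pre_training_data data_para → Spec_training_data data_para (training_data data_para)

-- ===== LEMMAS AND PROOFS =====
-- Characterisation of A's loop: each row is classified by the running counter, which cycles 0..99.
def specGo (c : Nat) : List (List String) → List (List String) × List (List String)
  | [] => ([], [])
  | row :: rest =>
    let p := specGo ((c + 1) % 100) rest
    (if c < 80 then rowSplit row :: p.1 else p.1,
     if 80 ≤ c then rowSplit row :: p.2 else p.2)

lemma altGo_nil : altGo [] = ([], []) := by rw [altGo]

lemma altGo_cons (x : List String) (xs : List (List String)) : altGo (x :: xs) =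
    ((((x :: xs).take 100).take 80).map rowSplit ++ (altGo (xs.drop 99)).1,
     (((x :: xs).take 100).drop 80).map rowSplit ++ (altGo (xs.drop 99)).2) := by
  rw [altGo]

lemma fold_eq (data : List (List String)) : ∀ (c : Nat), c < 100 →
    ∀ num test, ∃ c', data.foldl trainStep (num, test, (c : Int)) =
      (num ++ (specGo c data).1, test ++ (specGo c data).2, c') := by
  induction data with
  | nil => intro c _ num test; exact ⟨c, by simp [specGo]⟩
  | cons row rest ih =>
    intro c hc num test
    have hstep : trainStep (num, test, (c : Int)) row =
        ((if c < 80 then num ++ [rowSplit row] else num),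
         (if 80 ≤ c then test ++ [rowSplit row] else test),
         (((c + 1) % 100 : Nat) : Int)) := by
      simp only [trainStep, Prod.mk.injEq]
      refine ⟨?_, ?_, ?_⟩
      · have h1 : ((c : Int) < 80) ↔ c < 80 := by omega
        simp [h1]
      · have h2 : (80 ≤ c ∧ c < 100) ↔ 80 ≤ c := by omega
        simp [h2]
      · by_cases h99 : c = 99
        · subst h99; norm_num
        · have h3 : ¬((c : Int) + 1 = 100) := by omega
          rw [if_neg h3, Nat.mod_eq_of_lt (by omega)]
          push_cast; ring
    rw [List.foldl_cons, hstep]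
    obtain ⟨c', hc'⟩ := ih ((c + 1) % 100) (Nat.mod_lt _ (by omega))
      (if c < 80 then num ++ [rowSplit row] else num)
      (if 80 ≤ c then test ++ [rowSplit row] else test)
    refine ⟨c', ?_⟩
    rw [hc']
    simp only [specGo]
    split_ifs with h1 h2 h2 <;> simp

lemma specChunk (data : List (List String)) : ∀ c, c < 100 →
    specGo c data =
      (((data.take (100 - c)).take (80 - c)).map rowSplit ++ (specGo 0 (data.drop (100 - c))).1,
       ((data.take (100 - c)).drop (80 - c)).map rowSplit ++ (specGo 0 (data.drop (100 - c))).2) := by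
  induction data with
  | nil => intro c hc; simp [specGo]
  | cons row rest ih =>
    intro c hc
    by_cases h99 : c = 99
    · subst h99
      simp [specGo, show (99 + 1) % 100 = 0 from rfl]
    · have hm : (c + 1) % 100 = c + 1 := Nat.mod_eq_of_lt (by omega)
      have hIH := ih (c + 1) (by omega)
      rw [show 100 - (c + 1) = 99 - c by omega, show 80 - (c + 1) = 79 - c by omega] at hIH
      have h100 : 100 - c = (99 - c) + 1 := by omega
      by_cases h80 : c < 80
      · have h80' : 80 - c = (79 - c) + 1 := by omega
        simp only [specGo, hm, hIH, h100, h80', List.take_succ_cons, List.drop_succ_cons,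
          List.map_cons, if_pos h80, if_neg (by omega : ¬ 80 ≤ c)]
        simp
      · have h80' : 80 - c = 0 := by omega
        have h79' : 79 - c = 0 := by omega
        simp only [specGo, hm, hIH, h100, h80', h79', List.take_succ_cons, List.drop_succ_cons,
          List.take_zero, List.drop_zero, List.map_cons, List.map_nil,
          if_neg h80, if_pos (by omega : 80 ≤ c)]
        simp

lemma spec0_eq_alt : ∀ (n : Nat) (data : List (List String)), data.length ≤ n →
    specGo 0 data = altGo data := by
  intro n
  induction n with
  | zero =>
    intro data h
    rw [List.length_eq_zero_iff.mp (Nat.le_zero.mp h)]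
    simp [specGo, altGo_nil]
  | succ n ih =>
    intro data h
    cases data with
    | nil => simp [specGo, altGo_nil]
    | cons x xs =>
      rw [specChunk (x :: xs) 0 (by omega)]
      simp only [Nat.sub_zero, List.drop_succ_cons]
      rw [ih (xs.drop 99) (by simp at h ⊢; omega)]
      rw [altGo_cons]

-- ===== VERDICT (by name: the statement is the Claim_ definition above) =====
theorem training_data_spec : Claim_equal_training_data := by
  intro data _ _
  unfold Spec_training_data training_data training_data_alt
  obtain ⟨c', hc'⟩ := fold_eq data 0 (by omega) [] []
  simp only [Nat.cast_zero] at hc'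
  rw [hc', spec0_eq_alt data.length data le_rfl]
  simp
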